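-- pv_equiv track=rewrite | github.com/AbleDabble/stylo | code/Profile.py | countFuncWords
-- ===== SOURCE A (Python) =====
-- def countFuncWords(words, funcWords):
--     d = {}
--     for word in funcWords:
--         d[word] = 0
--     count = []
--     for word in words:
--         if word in funcWords:
--             d[word] += 1
--     for word in sorted(d.keys()):
--         count.append(d[word])
--     return count
-- ===== SOURCE B (Python) =====
-- def countFuncWords(words, funcWords):
--     return [words.count(w) for w in sorted(set(funcWords))]
-- ===== Notes on version B (the rewrite author's own statement) =====
-- stated objective: simpler
-- what changed: Replaces A's three passes (dict seeding, guarded single-pass tally, key-sorted readout) with a per-word rescan: one words.count(w) scan for each sorted distinct func-word.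
import Mathlib
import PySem

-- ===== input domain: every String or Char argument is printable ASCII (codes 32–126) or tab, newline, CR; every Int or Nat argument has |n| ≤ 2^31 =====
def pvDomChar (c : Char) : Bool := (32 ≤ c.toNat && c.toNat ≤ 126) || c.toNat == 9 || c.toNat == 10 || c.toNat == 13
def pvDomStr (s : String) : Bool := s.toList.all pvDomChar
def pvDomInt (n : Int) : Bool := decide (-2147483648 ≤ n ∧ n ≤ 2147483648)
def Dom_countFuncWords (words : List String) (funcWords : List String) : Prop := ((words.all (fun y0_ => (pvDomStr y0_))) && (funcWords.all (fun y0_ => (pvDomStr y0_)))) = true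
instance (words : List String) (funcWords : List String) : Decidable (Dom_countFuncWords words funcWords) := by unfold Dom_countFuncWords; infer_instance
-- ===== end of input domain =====

-- ===== PORT A =====
-- B changes A's dict-seeding + guarded single-pass tally + sorted readout into a
-- per-word rescan of `words` (objective: simpler).
def countFuncWords (words : List String) (funcWords : List String) : List Int :=
  let d : PySem.Dict String Int :=
    funcWords.foldl (fun d word => d.insert word 0) PySem.Dict.empty
  let d :=
    words.foldl (fun d word =>
      if funcWords.contains word then d.modify word 0 (· + 1) else d) d
  (PySem.List.sorted d.keys (fun x => x) false).map (fun word => d.getD word 0)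

-- ===== PORT B =====
def countFuncWords_alt (words : List String) (funcWords : List String) : List Int :=
  (PySem.List.sorted (PySem.Set.ofList funcWords) (fun x => x) false).map
    (fun w => (PySem.List.count words w : Int))

-- ===== PRECONDITION & SPEC =====
def Spec_countFuncWords (words : List String) (funcWords : List String) (out : List Int) : Prop := out = countFuncWords_alt words funcWords
instance (words : List String) (funcWords : List String) (out : List Int) : Decidable (Spec_countFuncWords words funcWords out) := by unfold Spec_countFuncWords; infer_instance

-- ===== CLAIM (what is proved, stated in full; the proofs are below) =====
def Claim_equal_countFuncWords : Prop := ∀ (words : List String) (funcWords : List String), Dom_countFuncWords words funcWords → Spec_countFuncWords words funcWords (countFuncWords words funcWords)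

-- ===== LEMMAS AND PROOFS =====

-- the seeding loop only stores 0s, so every getD with default 0 is 0
theorem getD_seed (l : List String) (d : PySem.Dict String Int) (v : String)
    (h : d.getD v 0 = 0) :
    (l.foldl (fun d word => d.insert word 0) d).getD v 0 = 0 := by
  induction l generalizing d with
  | nil => simpa using h
  | cons w t ih =>
      simp only [List.foldl_cons]
      exact ih _ (by rw [PySem.Dict.getD_insert]; split <;> simp [h])

-- adding elements already present leaves a PySem.Set unchanged
theorem set_update_of_subset (s : List String) (l : List String)
    (h : ∀ x ∈ l, x ∈ s) : PySem.Set.update s l = s := by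
  induction l generalizing s with
  | nil => simp [PySem.Set.update]
  | cons x t ih =>
      have hx : x ∈ s := h x (by simp)
      have hstep : PySem.Set.update s (x :: t) = PySem.Set.update (PySem.Set.add s x) t := by
        simp [PySem.Set.update]
      have hadd : PySem.Set.add s x = s := by simp [PySem.Set.add, hx]
      rw [hstep, hadd]
      exact ih s fun y hy => h y (List.mem_cons_of_mem _ hy)

-- ===== VERDICT (by name: the statement is the Claim_ definition above) =====
theorem countFuncWords_spec : Claim_equal_countFuncWords := by
  intro words funcWords _
  unfold Spec_countFuncWords countFuncWords countFuncWords_alt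
  simp only
  rw [← List.foldl_filter]
  set d0 : PySem.Dict String Int :=
    funcWords.foldl (fun d word => d.insert word 0) PySem.Dict.empty with hd0
  set l := words.filter (fun word => funcWords.contains word) with hl
  have hkeys0 : d0.keys = PySem.Set.ofList funcWords := by
    rw [hd0, PySem.Dict.keys_foldl_insert]
    simp [PySem.Set.update_nil_left]
  have hkeys : (l.foldl (fun d word => d.modify word 0 (· + 1)) d0).keys
      = PySem.Set.ofList funcWords := by
    rw [PySem.Dict.keys_foldl_modify, hkeys0]
    exact set_update_of_subset _ _ (fun x hx => by
      have := List.of_mem_filter hx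
      simpa [PySem.Set.mem_ofList] using this)
  rw [hkeys]
  refine List.map_congr_left (fun w hw => ?_)
  have hwmem : w ∈ funcWords := by
    simpa [PySem.List.mem_sorted, PySem.Set.mem_ofList] using hw
  rw [PySem.Dict.getD_foldl_modify_add_one, getD_seed _ _ _ (by simp)]
  simp [hl, PySem.List.count_eq, List.count_filter, hwmem]
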